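-- pv_equiv track=rewrite | github.com/haolunc/ARC-RL | reference_solutions/solutions/d968ffd4.py | transform
-- ===== SOURCE A (Python) =====
-- def transform(grid):
--
--     h = len(grid)
--     w = len(grid[0])
--
--     from collections import Counter
--     cnt = Counter()
--     for row in grid:
--         cnt.update(row)
--     background = cnt.most_common(1)[0][0]
--
--     colours = [c for c in cnt if c != background]
--     if len(colours) != 2:
--
--         return [list(row) for row in grid]
--
--     A, B = colours
--
--     def bounds(col):
--         min_r, max_r = h, -1
--         min_c, max_c = w, -1
--         for r in range(h):
--             for c in range(w):
--                 if grid[r][c] == col: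
--                     if r < min_r: min_r = r
--                     if r > max_r: max_r = r
--                     if c < min_c: min_c = c
--                     if c > max_c: max_c = c
--         return min_r, max_r, min_c, max_c
--
--     a_min_r, a_max_r, a_min_c, a_max_c = bounds(A)
--     b_min_r, b_max_r, b_min_c, b_max_c = bounds(B)
--
--     rows_overlap = not (a_max_r < b_min_r or b_max_r < a_min_r)
--     cols_overlap = not (a_max_c < b_min_c or b_max_c < a_min_c)
--
--     out = [list(row) for row in grid]
--
--     if rows_overlap:
--
--         if a_min_c < b_min_c:
--             left_col, left_min_c, left_max_c = A, a_min_c, a_max_c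
--             right_col, right_min_c, right_max_c = B, b_min_c, b_max_c
--         else:
--             left_col, left_min_c, left_max_c = B, b_min_c, b_max_c
--             right_col, right_min_c, right_max_c = A, a_min_c, a_max_c
--
--         gap = right_min_c - left_max_c - 1
--         expand = gap // 2
--
--         left_start = left_max_c + 1
--         left_end = left_max_c + expand
--
--         right_start = right_min_c - expand
--         right_end = right_min_c - 1
--
--         if gap % 2 == 0:
--
--             pass
--
--         for r in range(h):
--             for c in range(left_start, left_end + 1):
--                 out[r][c] = left_col
--             for c in range(right_start, right_end + 1):
--                 out[r][c] = right_col
--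
--     else:
--
--         if a_min_r < b_min_r:
--             top_col, top_min_r, top_max_r = A, a_min_r, a_max_r
--             bot_col, bot_min_r, bot_max_r = B, b_min_r, b_max_r
--         else:
--             top_col, top_min_r, top_max_r = B, b_min_r, b_max_r
--             bot_col, bot_min_r, bot_max_r = A, a_min_r, a_max_r
--
--         gap = bot_min_r - top_max_r - 1
--         expand = gap // 2
--
--         top_start = top_max_r + 1
--         top_end = top_max_r + expand
--         bot_start = bot_min_r - expand
--         bot_end = bot_min_r - 1
--
--         for r in range(top_start, top_end + 1):
--             for c in range(w):
--                 out[r][c] = top_col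
--         for r in range(bot_start, bot_end + 1):
--             for c in range(w):
--                 out[r][c] = bot_col
--
--     return out
-- ===== SOURCE B (Python) =====
-- def transform(grid):
--     h = len(grid)
--     w = len(grid[0])
--
--     from collections import Counter
--     cnt = Counter(v for row in grid for v in row)
--     background = max(cnt.items(), key=lambda kv: kv[1])[0]
--
--     colours = [c for c in cnt if c != background]
--     if len(colours) != 2:
--         return [list(row) for row in grid]
--     A, B = colours
--
--     def box(col):
--         rs = [r for r, row in enumerate(grid) if col in row]
--         cs = [c for c in range(w) if any(row[c] == col for row in grid)]
--         return min(rs), max(rs), min(cs), max(cs)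
--
--     a_min_r, a_max_r, a_min_c, a_max_c = box(A)
--     b_min_r, b_max_r, b_min_c, b_max_c = box(B)
--
--     out = [list(row) for row in grid]
--     rows_overlap = not (a_max_r < b_min_r or b_max_r < a_min_r)
--
--     if rows_overlap:
--         # grow the two regions one column layer at a time until they meet
--         if a_min_c < b_min_c:
--             lcol, lo, rcol, hi = A, a_max_c, B, b_min_c
--         else:
--             lcol, lo, rcol, hi = B, b_max_c, A, a_min_c
--         while hi - lo > 2:
--             for r in range(h):
--                 out[r][lo + 1] = lcol
--                 out[r][hi - 1] = rcol
--             lo += 1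
--             hi -= 1
--     else:
--         # grow the two regions one row layer at a time until they meet
--         if a_min_r < b_min_r:
--             tcol, lo, bcol, hi = A, a_max_r, B, b_min_r
--         else:
--             tcol, lo, bcol, hi = B, b_max_r, A, a_min_r
--         while hi - lo > 2:
--             out[lo + 1] = [tcol] * w
--             out[hi - 1] = [bcol] * w
--             lo += 1
--             hi -= 1
--     return out
-- ===== Notes on version B (the rewrite author's own statement) =====
-- stated objective: alternative
-- what changed: B derives each colour's bounding box from row/column occupancy predicates with min/max instead of A's running-extrema grid scans, and replaces A's closed-form half-gap band fill (gap//2 arithmetic and precomputed column/row ranges) by an iterative mutual-growth simulation that repeatedly paints one layer on each side of the gap until the two regions meet.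
-- outside the precondition, e.g. on transform([[0], [1, 2, 0]]): A returns [[0], [1, 2, 0]], B raises ValueError
import Mathlib
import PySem

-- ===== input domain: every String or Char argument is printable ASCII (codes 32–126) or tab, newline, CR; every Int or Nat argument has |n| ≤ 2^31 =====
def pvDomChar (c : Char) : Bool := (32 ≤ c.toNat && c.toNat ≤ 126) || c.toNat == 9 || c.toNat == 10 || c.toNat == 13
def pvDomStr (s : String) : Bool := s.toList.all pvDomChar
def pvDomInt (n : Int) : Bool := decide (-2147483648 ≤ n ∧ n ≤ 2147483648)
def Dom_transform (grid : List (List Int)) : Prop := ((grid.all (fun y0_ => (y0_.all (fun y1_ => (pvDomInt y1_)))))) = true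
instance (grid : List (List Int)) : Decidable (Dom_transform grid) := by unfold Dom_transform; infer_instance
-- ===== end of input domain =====

-- B finds each bounding box by min/max over row/column occupancy predicates instead of A's
-- running-extrema scans, and replaces A's closed-form half-gap band fill with an iterative
-- mutual-growth loop that paints one layer per side until the regions meet (objective: alternative).
-- Equivalence is proved on non-empty rectangular grids (Pre_); A raises or scans only a row prefix elsewhere.

-- ===== PORT A =====
-- cnt.most_common(1)[0][0]: first key of maximal count (most_common is a stable descending sort
-- by count); 'none' is unreachable under Pre_ (the grid has at least one cell).
def pvMostCommon1 (d : PySem.Dict Int Int) : Int :=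
  match PySem.List.max? d.items (fun kv => kv.2) with
  | some kv => kv.1
  | none => 0

-- the four separate 'if r < min_r: …' updates of A's bounds, as one state update
def pvBoundsA (grid : List (List Int)) (h w col : Int) : Int × Int × Int × Int :=
  (PySem.List.pyRange 0 h 1).foldl (fun s r =>
    (PySem.List.pyRange 0 w 1).foldl (fun s c =>
      if PySem.List.pyGetD (PySem.List.pyGetD grid r []) c 0 == col then
        (if r < s.1 then r else s.1,
         if r > s.2.1 then r else s.2.1,
         if c < s.2.2.1 then c else s.2.2.1,
         if c > s.2.2.2 then c else s.2.2.2)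
      else s) s) (h, -1, w, -1)

-- out[r][c] = v  (r, c are non-negative and in range wherever either Python executes this under Pre_)
def pvSetCell (out : List (List Int)) (r c v : Int) : List (List Int) :=
  PySem.List.pySetD out r (PySem.List.pySetD (PySem.List.pyGetD out r []) c v)

def transform (grid : List (List Int)) : List (List Int) :=
  let h : Int := grid.length
  let w : Int := (PySem.List.pyGetD grid 0 []).length
  let cnt := grid.foldl (fun d row => row.foldl (fun d x => PySem.Dict.modify d x 0 (· + 1)) d)
    PySem.Dict.empty
  let background := pvMostCommon1 cnt
  let colours := cnt.keys.filter (fun c => !(c == background))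
  if colours.length ≠ 2 then grid.map (fun row => row)
  else
    let cA := PySem.List.pyGetD colours 0 0
    let cB := PySem.List.pyGetD colours 1 0
    let ba := pvBoundsA grid h w cA
    let bb := pvBoundsA grid h w cB
    let rowsOverlap := !(decide (ba.2.1 < bb.1) || decide (bb.2.1 < ba.1))
    let out := grid.map (fun row => row)
    if rowsOverlap then
      let lr := if ba.2.2.1 < bb.2.2.1 then (cA, ba.2.2.1, ba.2.2.2, cB, bb.2.2.1, bb.2.2.2)
                else (cB, bb.2.2.1, bb.2.2.2, cA, ba.2.2.1, ba.2.2.2)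
      let leftCol := lr.1; let leftMaxC := lr.2.2.1
      let rightCol := lr.2.2.2.1; let rightMinC := lr.2.2.2.2.1
      let gap := rightMinC - leftMaxC - 1
      let expand := PySem.Int.floordiv gap 2
      let leftStart := leftMaxC + 1
      let leftEnd := leftMaxC + expand
      let rightStart := rightMinC - expand
      let rightEnd := rightMinC - 1
      -- 'if gap % 2 == 0: pass' is a no-op
      (PySem.List.pyRange 0 h 1).foldl (fun out r =>
        (PySem.List.pyRange rightStart (rightEnd + 1) 1).foldl
          (fun out c => pvSetCell out r c rightCol)
          ((PySem.List.pyRange leftStart (leftEnd + 1) 1).foldl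
            (fun out c => pvSetCell out r c leftCol) out)) out
    else
      let tb := if ba.1 < bb.1 then (cA, ba.1, ba.2.1, cB, bb.1, bb.2.1)
                else (cB, bb.1, bb.2.1, cA, ba.1, ba.2.1)
      let topCol := tb.1; let topMaxR := tb.2.2.1
      let botCol := tb.2.2.2.1; let botMinR := tb.2.2.2.2.1
      let gap := botMinR - topMaxR - 1
      let expand := PySem.Int.floordiv gap 2
      let topStart := topMaxR + 1
      let topEnd := topMaxR + expand
      let botStart := botMinR - expand
      let botEnd := botMinR - 1
      (PySem.List.pyRange botStart (botEnd + 1) 1).foldl (fun out r =>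
        (PySem.List.pyRange 0 w 1).foldl (fun out c => pvSetCell out r c botCol) out)
        ((PySem.List.pyRange topStart (topEnd + 1) 1).foldl (fun out r =>
          (PySem.List.pyRange 0 w 1).foldl (fun out c => pvSetCell out r c topCol) out) out)

-- ===== PORT B =====
-- min(xs) / max(xs); 'none' unreachable under Pre_ (each of the two colours occurs in the grid)
def pvMinB (xs : List Int) : Int :=
  match PySem.List.min? xs (fun x => x) with
  | some m => m
  | none => 0

def pvMaxB (xs : List Int) : Int :=
  match PySem.List.max? xs (fun x => x) with
  | some m => m
  | none => 0

-- rs = [r for r, row in enumerate(grid) if col in row]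
-- cs = [c for c in range(w) if any(row[c] == col for row in grid)]
def pvBoxB (grid : List (List Int)) (w col : Int) : Int × Int × Int × Int :=
  let rs := ((PySem.List.enumerate grid 0).filter (fun p => p.2.contains col)).map (fun p => p.1)
  let cs := (PySem.List.pyRange 0 w 1).filter
    (fun c => grid.any (fun row => PySem.List.pyGetD row c 0 == col))
  (pvMinB rs, pvMaxB rs, pvMinB cs, pvMaxB cs)

-- B's horizontal while loop: paint columns lo+1 and hi-1 in every row, then move inward
def pvGrowH (h lC rC lo hi : Int) (out : List (List Int)) : List (List Int) :=
  if hstop : hi - lo ≤ 2 then out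
  else
    pvGrowH h lC rC (lo + 1) (hi - 1)
      ((PySem.List.pyRange 0 h 1).foldl
        (fun o r => pvSetCell (pvSetCell o r (lo + 1) lC) r (hi - 1) rC) out)
termination_by (hi - lo).toNat
decreasing_by omega

-- B's vertical while loop: out[lo+1] = [tcol]*w; out[hi-1] = [bcol]*w, then move inward
def pvGrowV (w tC bC lo hi : Int) (out : List (List Int)) : List (List Int) :=
  if hstop : hi - lo ≤ 2 then out
  else
    pvGrowV w tC bC (lo + 1) (hi - 1)
      (PySem.List.pySetD (PySem.List.pySetD out (lo + 1) (PySem.List.pyRepeat [tC] w))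
        (hi - 1) (PySem.List.pyRepeat [bC] w))
termination_by (hi - lo).toNat
decreasing_by omega

def transform_alt (grid : List (List Int)) : List (List Int) :=
  let h : Int := grid.length
  let w : Int := (PySem.List.pyGetD grid 0 []).length
  let cnt := PySem.Dict.counter (grid.flatMap (fun row => row))
  let background :=
    match PySem.List.max? cnt.items (fun kv => kv.2) with
    | some kv => kv.1
    | none => 0
  let colours := cnt.keys.filter (fun c => !(c == background))
  if colours.length ≠ 2 then grid.map (fun row => row)
  else
    let cA := PySem.List.pyGetD colours 0 0
    let cB := PySem.List.pyGetD colours 1 0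
    let ba := pvBoxB grid w cA
    let bb := pvBoxB grid w cB
    let out := grid.map (fun row => row)
    let rowsOverlap := !(decide (ba.2.1 < bb.1) || decide (bb.2.1 < ba.1))
    if rowsOverlap then
      let lr := if ba.2.2.1 < bb.2.2.1 then (cA, ba.2.2.2, cB, bb.2.2.1)
                else (cB, bb.2.2.2, cA, ba.2.2.1)
      pvGrowH h lr.1 lr.2.2.1 lr.2.1 lr.2.2.2 out
    else
      let tb := if ba.1 < bb.1 then (cA, ba.2.1, cB, bb.1)
                else (cB, bb.2.1, cA, ba.1)
      pvGrowV w tb.1 tb.2.2.1 tb.2.1 tb.2.2.2 out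

-- ===== PRECONDITION & SPEC =====
-- Pre_ excludes grids with no cells at all (A raises IndexError on grid[0] or on
-- most_common of an empty Counter) and non-rectangular grids with exactly 3 distinct
-- cell values (there A raises IndexError when a row is shorter than row 0, and where every
-- row is at least as long as row 0 its value reflects scanning only the first len(grid[0])
-- columns of each row — outside the rectangular ARC-grid domain this function is for).
def Pre_transform (grid : List (List Int)) : Prop :=
  grid.flatMap (fun row => row) ≠ [] ∧
    ((PySem.Set.ofList (grid.flatMap (fun row => row))).length ≠ 3 ∨
      ∀ row ∈ grid, row.length = (grid.headD []).length)
instance (grid : List (List Int)) : Decidable (Pre_transform grid) := by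
  unfold Pre_transform; infer_instance

def pvWitness_transform : List (List Int) := [[0, 1, 0], [0, 0, 0], [0, 0, 0], [0, 2, 0]]

def Spec_transform (grid : List (List Int)) (out : List (List Int)) : Prop := out = transform_alt grid
instance (grid : List (List Int)) (out : List (List Int)) : Decidable (Spec_transform grid out) := by
  unfold Spec_transform; infer_instance

-- ===== CLAIM (what is proved, stated in full; the proofs are below) =====
def Claim_equal_transform : Prop :=
  ∀ (grid : List (List Int)), Dom_transform grid → Pre_transform grid →
    Spec_transform grid (transform grid)

-- ===== LEMMAS AND PROOFS =====

theorem pySetD_oob {α : Type} (xs : List α) (i : Int) (h0 : 0 ≤ i) (h : xs.length ≤ i.toNat)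
    (v : α) : PySem.List.pySetD xs i v = xs := by
  rw [PySem.List.pySetD_of_nonneg xs v h0]; exact List.set_eq_of_length_le h

theorem pyGetD_pySetD_self {α : Type} (xs : List α) (i : Int) (x d : α) (h0 : 0 ≤ i)
    (hlen : i.toNat < xs.length) :
    PySem.List.pyGetD (PySem.List.pySetD xs i x) i d = x := by
  rw [PySem.List.pySetD_of_nonneg xs x h0,
    PySem.List.pyGetD_eq_getElem _ d h0 (by rw [List.length_set]; omega),
    List.getElem_set_self (by simpa using hlen)]

theorem pvSetCell_foldl (cs : List Int) (r v : Int) (hr : 0 ≤ r) (out : List (List Int)) :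
    cs.foldl (fun o c => pvSetCell o r c v) out
      = PySem.List.pySetD out r
          (cs.foldl (fun row c => PySem.List.pySetD row c v) (PySem.List.pyGetD out r [])) := by
  induction cs generalizing out with
  | nil =>
    simp only [List.foldl_nil]
    by_cases hlen : r.toNat < out.length
    · rw [PySem.List.pyGetD_eq_getElem out [] hr (by omega),
        PySem.List.pySetD_of_nonneg out _ hr, List.set_getElem_self]
    · rw [pySetD_oob out r hr (by omega)]
  | cons c cs ih =>
    simp only [List.foldl_cons]
    rw [ih]
    by_cases hlen : r.toNat < out.length
    · unfold pvSetCell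
      rw [PySem.List.pySetD_of_nonneg out _ hr,
        PySem.List.pyGetD_eq_getElem (out.set r.toNat _) [] hr (by rw [List.length_set]; omega),
        List.getElem_set_self (by simpa using hlen), PySem.List.pySetD_of_nonneg (out.set r.toNat _) _ hr,
        List.set_set, ← PySem.List.pySetD_of_nonneg out _ hr]
    · unfold pvSetCell
      rw [pySetD_oob out r hr (by omega), pySetD_oob out r hr (by omega),
        pySetD_oob out r hr (by omega)]

-- the two cell writes of one row of B's horizontal loop body, collapsed to one row update
theorem pvSetCell2 (o : List (List Int)) (r c1 v1 c2 v2 : Int) (hr : 0 ≤ r) :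
    pvSetCell (pvSetCell o r c1 v1) r c2 v2
      = PySem.List.pySetD o r
          (PySem.List.pySetD (PySem.List.pySetD (PySem.List.pyGetD o r []) c1 v1) c2 v2) := by
  by_cases hlen : r.toNat < o.length
  · unfold pvSetCell
    rw [pyGetD_pySetD_self o r _ [] hr hlen,
      PySem.List.pySetD_of_nonneg o _ hr, PySem.List.pySetD_of_nonneg (o.set r.toNat _) _ hr,
      List.set_set, ← PySem.List.pySetD_of_nonneg o _ hr]
  · unfold pvSetCell
    rw [pySetD_oob o r hr (by omega), pySetD_oob o r hr (by omega), pySetD_oob o r hr (by omega)]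

theorem gridfill_getElem? (f : List Int → List Int) (b : Int) :
    ∀ (n : Nat) (a : Int) (g : List (List Int)) (k : Nat), 0 ≤ a → (b - a).toNat = n →
      ((PySem.List.pyRange a b 1).foldl
          (fun out r => PySem.List.pySetD out r (f (PySem.List.pyGetD out r []))) g)[k]? =
        if a ≤ (k : Int) ∧ (k : Int) < b ∧ k < g.length then (g[k]?).map f else g[k]? := by
  intro n
  induction n with
  | zero =>
    intro a g k ha hn
    rw [PySem.List.pyRange_one_eq_nil (by omega)]
    simp only [List.foldl_nil]
    rw [if_neg (by omega)]
  | succ n ih =>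
    intro a g k ha hn
    rw [PySem.List.pyRange_one_cons (by omega)]
    simp only [List.foldl_cons]
    rw [ih (a + 1) _ k (by omega) (by omega)]
    rw [PySem.List.pySetD_of_nonneg g _ ha]
    simp only [List.length_set]
    rw [List.getElem?_set]
    split_ifs with h1 h2 h3 h4 h5 h6 h7 h8
    all_goals try omega
    · rfl
    · subst h7
      rw [PySem.List.pyGetD_eq_getElem g [] ha (by omega), List.getElem?_eq_getElem h8]
      rfl
    · rw [List.getElem?_eq_none (by omega)]
    · rfl

theorem rowfill_getElem? (v b : Int) :
    ∀ (n : Nat) (a : Int) (row : List Int) (k : Nat), 0 ≤ a → (b - a).toNat = n →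
      ((PySem.List.pyRange a b 1).foldl (fun r c => PySem.List.pySetD r c v) row)[k]? =
        if a ≤ (k : Int) ∧ (k : Int) < b ∧ k < row.length then some v else row[k]? := by
  intro n
  induction n with
  | zero =>
    intro a row k ha hn
    rw [PySem.List.pyRange_one_eq_nil (by omega)]
    simp only [List.foldl_nil]
    rw [if_neg (by omega)]
  | succ n ih =>
    intro a row k ha hn
    rw [PySem.List.pyRange_one_cons (by omega)]
    simp only [List.foldl_cons]
    rw [ih (a + 1) _ k (by omega) (by omega)]
    rw [PySem.List.pySetD_of_nonneg row v ha]
    simp only [List.length_set]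
    rw [List.getElem?_set]
    split_ifs <;> simp_all <;> omega

theorem foldl_pySetD_length {α : Type} (cs : List Int) (f : List α → Int → α) (g : List α) :
    (cs.foldl (fun out r => PySem.List.pySetD out r (f out r)) g).length = g.length := by
  induction cs generalizing g with
  | nil => rfl
  | cons c cs ih => simp [List.foldl_cons, ih, PySem.List.length_pySetD]

theorem rowlevel_H (row : List Int) (lC rC ls le rs re : Int) (h0l : 0 ≤ ls) (h0r : 0 ≤ rs)
    (hdisj : ∀ k : Int, ¬((ls ≤ k ∧ k ≤ le) ∧ (rs ≤ k ∧ k ≤ re))) :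
    (PySem.List.pyRange rs (re + 1) 1).foldl (fun r c => PySem.List.pySetD r c rC)
      ((PySem.List.pyRange ls (le + 1) 1).foldl (fun r c => PySem.List.pySetD r c lC) row)
    = (PySem.List.enumerate row 0).map (fun p =>
        if ls ≤ p.1 ∧ p.1 ≤ le then lC else if rs ≤ p.1 ∧ p.1 ≤ re then rC else p.2) := by
  apply List.ext_getElem?
  intro j
  rw [rowfill_getElem? rC (re + 1) _ rs _ j h0r rfl,
    rowfill_getElem? lC (le + 1) _ ls _ j h0l rfl]
  rw [show ((PySem.List.pyRange ls (le + 1) 1).foldl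
      (fun r c => PySem.List.pySetD r c lC) row).length = row.length from
    foldl_pySetD_length _ (fun _ _ => lC) row]
  rw [List.getElem?_map, PySem.List.getElem?_enumerate]
  by_cases hj : j < row.length
  · rw [List.getElem?_eq_getElem hj]
    simp only [Option.map_some]
    have hd := hdisj (j : Int)
    simp only [zero_add]
    split_ifs <;> first | rfl | (exfalso; omega)
  · rw [List.getElem?_eq_none (by omega)]
    rw [if_neg (by omega), if_neg (by omega)]
    rfl

theorem fillH_eq (grid : List (List Int)) (lC rC ls le rs re : Int)
    (h0l : 0 ≤ ls) (h0r : 0 ≤ rs)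
    (hdisj : ∀ k : Int, ¬((ls ≤ k ∧ k ≤ le) ∧ (rs ≤ k ∧ k ≤ re))) :
    (PySem.List.pyRange 0 (grid.length : Int) 1).foldl (fun out r =>
        (PySem.List.pyRange rs (re + 1) 1).foldl (fun out c => pvSetCell out r c rC)
          ((PySem.List.pyRange ls (le + 1) 1).foldl (fun out c => pvSetCell out r c lC) out))
      (grid.map fun row => row)
    = grid.map (fun row => (PySem.List.enumerate row 0).map (fun p =>
        if ls ≤ p.1 ∧ p.1 ≤ le then lC else if rs ≤ p.1 ∧ p.1 ≤ re then rC else p.2)) := by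
  rw [List.map_id' grid]
  have hbody : ∀ (out : List (List Int)) (r : Int), r ∈ PySem.List.pyRange 0 (grid.length : Int) 1 →
      (PySem.List.pyRange rs (re + 1) 1).foldl (fun out c => pvSetCell out r c rC)
        ((PySem.List.pyRange ls (le + 1) 1).foldl (fun out c => pvSetCell out r c lC) out)
      = PySem.List.pySetD out r
          ((PySem.List.pyRange rs (re + 1) 1).foldl (fun row c => PySem.List.pySetD row c rC)
            ((PySem.List.pyRange ls (le + 1) 1).foldl (fun row c => PySem.List.pySetD row c lC)
              (PySem.List.pyGetD out r []))) := by
    intro out r hrm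
    have hr : 0 ≤ r := ((PySem.List.mem_pyRange_one).mp hrm).1
    rw [pvSetCell_foldl _ r lC hr out, pvSetCell_foldl _ r rC hr _]
    by_cases hlen : r.toNat < out.length
    · rw [pyGetD_pySetD_self out r _ [] hr hlen, PySem.List.pySetD_of_nonneg out _ hr,
        PySem.List.pySetD_of_nonneg (out.set r.toNat _) _ hr, List.set_set,
        ← PySem.List.pySetD_of_nonneg out _ hr]
    · rw [pySetD_oob out r hr (by omega), pySetD_oob out r hr (by omega),
        pySetD_oob out r hr (by omega)]
  have hfold := PySem.List.foldl_congr_mem _ _ _ grid hbody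
  rw [hfold]
  apply List.ext_getElem?
  intro k
  rw [gridfill_getElem? (fun row => (PySem.List.pyRange rs (re + 1) 1).foldl
        (fun row c => PySem.List.pySetD row c rC)
        ((PySem.List.pyRange ls (le + 1) 1).foldl (fun row c => PySem.List.pySetD row c lC) row))
      (grid.length : Int) (grid.length : Int).toNat 0 grid k (by omega) (by omega)]
  rw [List.getElem?_map]
  by_cases hk : k < grid.length
  · rw [if_pos ⟨by omega, by omega, hk⟩, List.getElem?_eq_getElem hk]
    simp only [Option.map_some]
    rw [rowlevel_H _ lC rC ls le rs re h0l h0r hdisj]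
  · rw [if_neg (by omega), List.getElem?_eq_none (by omega)]
    rfl

theorem rowfull (row : List Int) (v w : Int) (hlen : (row.length : Int) = w) :
    (PySem.List.pyRange 0 w 1).foldl (fun r c => PySem.List.pySetD r c v) row
      = PySem.List.pyRepeat [v] w := by
  apply List.ext_getElem?
  intro j
  rw [rowfill_getElem? v w _ 0 row j (by omega) rfl, PySem.List.pyRepeat_singleton,
    List.getElem?_replicate]
  by_cases hj : j < row.length
  · rw [if_pos ⟨by omega, by omega, hj⟩, if_pos (by omega)]
  · rw [if_neg (by omega), if_neg (by omega), List.getElem?_eq_none (by omega)]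

theorem fillV_eq (grid : List (List Int)) (w tC bC ts te bs be : Int)
    (h0t : 0 ≤ ts) (h0b : 0 ≤ bs)
    (hdisj : ∀ k : Int, ¬((ts ≤ k ∧ k ≤ te) ∧ (bs ≤ k ∧ k ≤ be)))
    (hrect : ∀ row ∈ grid, (row.length : Int) = w) :
    (PySem.List.pyRange bs (be + 1) 1).foldl (fun out r =>
        (PySem.List.pyRange 0 w 1).foldl (fun out c => pvSetCell out r c bC) out)
      ((PySem.List.pyRange ts (te + 1) 1).foldl (fun out r =>
        (PySem.List.pyRange 0 w 1).foldl (fun out c => pvSetCell out r c tC) out)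
        (grid.map fun row => row))
    = (PySem.List.enumerate grid 0).map (fun p =>
        if ts ≤ p.1 ∧ p.1 ≤ te then PySem.List.pyRepeat [tC] w
        else if bs ≤ p.1 ∧ p.1 ≤ be then PySem.List.pyRepeat [bC] w
        else p.2.map (fun x => x)) := by
  rw [List.map_id' grid]
  have hT := PySem.List.foldl_congr_mem (PySem.List.pyRange ts (te + 1) 1) _
    (fun out r => PySem.List.pySetD out r
      ((PySem.List.pyRange 0 w 1).foldl (fun row c => PySem.List.pySetD row c tC)
        (PySem.List.pyGetD out r []))) grid
    (fun acc r hrm => pvSetCell_foldl (PySem.List.pyRange 0 w 1) r tC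
      (le_trans h0t ((PySem.List.mem_pyRange_one).mp hrm).1) acc)
  rw [hT]
  have hB := PySem.List.foldl_congr_mem (PySem.List.pyRange bs (be + 1) 1) _
    (fun out r => PySem.List.pySetD out r
      ((PySem.List.pyRange 0 w 1).foldl (fun row c => PySem.List.pySetD row c bC)
        (PySem.List.pyGetD out r [])))
    ((PySem.List.pyRange ts (te + 1) 1).foldl (fun out r =>
        PySem.List.pySetD out r
          ((PySem.List.pyRange 0 w 1).foldl (fun row c => PySem.List.pySetD row c tC)
            (PySem.List.pyGetD out r []))) grid)
    (fun acc r hrm => pvSetCell_foldl (PySem.List.pyRange 0 w 1) r bC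
      (le_trans h0b ((PySem.List.mem_pyRange_one).mp hrm).1) acc)
  rw [hB]
  apply List.ext_getElem?
  intro k
  have hlen1 : ((PySem.List.pyRange ts (te + 1) 1).foldl (fun out r =>
      PySem.List.pySetD out r
        ((PySem.List.pyRange 0 w 1).foldl (fun row c => PySem.List.pySetD row c tC)
          (PySem.List.pyGetD out r []))) grid).length = grid.length :=
    foldl_pySetD_length _ _ grid
  rw [gridfill_getElem? (fun row => (PySem.List.pyRange 0 w 1).foldl
      (fun row c => PySem.List.pySetD row c bC) row) (be + 1) (be + 1 - bs).toNat bs _ k h0b rfl]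
  rw [gridfill_getElem? (fun row => (PySem.List.pyRange 0 w 1).foldl
      (fun row c => PySem.List.pySetD row c tC) row) (te + 1) (te + 1 - ts).toNat ts grid k h0t rfl]
  rw [hlen1, List.getElem?_map, PySem.List.getElem?_enumerate]
  by_cases hk : k < grid.length
  · have hmem : grid[k] ∈ grid := List.getElem_mem hk
    have hrl := hrect _ hmem
    rw [List.getElem?_eq_getElem hk]
    simp only [Option.map_some, zero_add]
    have hd := hdisj (k : Int)
    by_cases htop : ts ≤ (k : Int) ∧ (k : Int) ≤ te
    · rw [if_neg (show ¬(bs ≤ (k : Int) ∧ (k : Int) < be + 1 ∧ k < grid.length) by omega),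
        if_pos ⟨htop.1, by omega, hk⟩]
      rw [rowfull _ tC w hrl, if_pos htop]
    · by_cases hbot : bs ≤ (k : Int) ∧ (k : Int) ≤ be
      · rw [if_pos ⟨hbot.1, by omega, hk⟩,
          if_neg (show ¬(ts ≤ (k : Int) ∧ (k : Int) < te + 1 ∧ k < grid.length) by omega)]
        simp only [Option.map_some]
        rw [rowfull _ bC w hrl, if_neg htop, if_pos hbot]
      · rw [if_neg (show ¬(bs ≤ (k : Int) ∧ (k : Int) < be + 1 ∧ k < grid.length) by omega),
          if_neg (show ¬(ts ≤ (k : Int) ∧ (k : Int) < te + 1 ∧ k < grid.length) by omega),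
          if_neg htop, if_neg hbot, List.map_id']
  · rw [if_neg (by omega), if_neg (by omega), List.getElem?_eq_none (by omega)]
    rfl

-- ----- characterization of B's growth loops -----

def pvPaintRow (lC rC ls le rs re : Int) (row : List Int) : List Int :=
  (PySem.List.enumerate row 0).map (fun p =>
    if ls ≤ p.1 ∧ p.1 ≤ le then lC else if rs ≤ p.1 ∧ p.1 ≤ re then rC else p.2)

theorem paintRow_id (lC rC ls le rs re : Int) (hl : le < ls) (hr : re < rs) (row : List Int) :
    pvPaintRow lC rC ls le rs re row = row := by
  unfold pvPaintRow
  apply List.ext_getElem?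
  intro j
  rw [List.getElem?_map, PySem.List.getElem?_enumerate]
  cases hx : row[j]? with
  | none => rfl
  | some v =>
    simp only [Option.map_some]
    rw [if_neg (by omega), if_neg (by omega)]

theorem paintStep (lC rC lo hi e : Int) (h0 : 0 ≤ lo) (he : 1 ≤ e) (hsep : lo + e < hi - e)
    (row : List Int) :
    pvPaintRow lC rC (lo + 2) (lo + e) (hi - e) (hi - 2)
      (PySem.List.pySetD (PySem.List.pySetD row (lo + 1) lC) (hi - 1) rC)
    = pvPaintRow lC rC (lo + 1) (lo + e) (hi - e) (hi - 1) row := by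
  have h1 : (0 : Int) ≤ lo + 1 := by omega
  have h2 : (0 : Int) ≤ hi - 1 := by omega
  unfold pvPaintRow
  apply List.ext_getElem?
  intro j
  rw [List.getElem?_map, List.getElem?_map, PySem.List.getElem?_enumerate,
    PySem.List.getElem?_enumerate]
  rw [PySem.List.pySetD_of_nonneg row lC h1, PySem.List.pySetD_of_nonneg _ rC h2]
  by_cases hj : j < row.length
  · rw [List.getElem?_eq_getElem (by simpa using hj), List.getElem?_eq_getElem hj]
    simp only [Option.map_some, List.getElem_set]
    split_ifs <;> first | rfl | omega
  · rw [List.getElem?_eq_none (by simpa using hj), List.getElem?_eq_none (by omega)]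
    rfl

theorem growH_base (h lC rC lo hi : Int) (hstop : hi - lo ≤ 2) (g : List (List Int)) (k : Nat) :
    (pvGrowH h lC rC lo hi g)[k]? =
      if (k : Int) < h ∧ k < g.length then
        (g[k]?).map (pvPaintRow lC rC (lo + 1) (lo + PySem.Int.floordiv (hi - lo - 1) 2)
          (hi - PySem.Int.floordiv (hi - lo - 1) 2) (hi - 1))
      else g[k]? := by
  rw [pvGrowH, dif_pos hstop]
  have hm := PySem.Int.floordiv_mul_add_mod (hi - lo - 1) 2
  have hm2 := PySem.Int.mod_nonneg (hi - lo - 1) (b := 2) (by norm_num)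
  have hm3 := PySem.Int.mod_lt (hi - lo - 1) (b := 2) (by norm_num)
  by_cases hc : (k : Int) < h ∧ k < g.length
  · rw [if_pos hc]
    cases hx : g[k]? with
    | none => rfl
    | some row =>
      simp only [Option.map_some]
      rw [paintRow_id _ _ _ _ _ _ (by omega) (by omega)]
  · rw [if_neg hc]

theorem layerH (h lC rC lo hi : Int) (g : List (List Int)) (k : Nat) :
    ((PySem.List.pyRange 0 h 1).foldl
        (fun o r => pvSetCell (pvSetCell o r (lo + 1) lC) r (hi - 1) rC) g)[k]? =
      if (k : Int) < h ∧ k < g.length then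
        (g[k]?).map (fun row =>
          PySem.List.pySetD (PySem.List.pySetD row (lo + 1) lC) (hi - 1) rC)
      else g[k]? := by
  have hbody : ∀ (o : List (List Int)) (r : Int), r ∈ PySem.List.pyRange 0 h 1 →
      pvSetCell (pvSetCell o r (lo + 1) lC) r (hi - 1) rC
        = PySem.List.pySetD o r
            (PySem.List.pySetD (PySem.List.pySetD (PySem.List.pyGetD o r []) (lo + 1) lC)
              (hi - 1) rC) :=
    fun o r hrm => pvSetCell2 o r (lo + 1) lC (hi - 1) rC ((PySem.List.mem_pyRange_one).mp hrm).1
  rw [PySem.List.foldl_congr_mem _ _ _ g hbody]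
  rw [gridfill_getElem? (fun row =>
      PySem.List.pySetD (PySem.List.pySetD row (lo + 1) lC) (hi - 1) rC) h h.toNat 0 g k
      (by omega) (by omega)]
  by_cases hc : (k : Int) < h ∧ k < g.length
  · rw [if_pos ⟨by omega, hc.1, hc.2⟩, if_pos hc]
  · rw [if_neg (by omega), if_neg hc]

theorem growH_char (h lC rC : Int) :
    ∀ (fuel : Nat) (lo hi : Int), (hi - lo).toNat ≤ fuel → 0 ≤ lo →
      ∀ (g : List (List Int)) (k : Nat),
        (pvGrowH h lC rC lo hi g)[k]? =
          if (k : Int) < h ∧ k < g.length then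
            (g[k]?).map (pvPaintRow lC rC (lo + 1) (lo + PySem.Int.floordiv (hi - lo - 1) 2)
              (hi - PySem.Int.floordiv (hi - lo - 1) 2) (hi - 1))
          else g[k]? := by
  intro fuel
  induction fuel with
  | zero =>
    intro lo hi hf h0 g k
    exact growH_base h lC rC lo hi (by omega) g k
  | succ n ih =>
    intro lo hi hf h0 g k
    by_cases hstop : hi - lo ≤ 2
    · exact growH_base h lC rC lo hi hstop g k
    · rw [pvGrowH, dif_neg hstop]
      have hm := PySem.Int.floordiv_mul_add_mod (hi - lo - 1) 2
      have hm2 := PySem.Int.mod_nonneg (hi - lo - 1) (b := 2) (by norm_num)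
      have hm3 := PySem.Int.mod_lt (hi - lo - 1) (b := 2) (by norm_num)
      have hm' := PySem.Int.floordiv_mul_add_mod (hi - 1 - (lo + 1) - 1) 2
      have hm2' := PySem.Int.mod_nonneg (hi - 1 - (lo + 1) - 1) (b := 2) (by norm_num)
      have hm3' := PySem.Int.mod_lt (hi - 1 - (lo + 1) - 1) (b := 2) (by norm_num)
      have heq : PySem.Int.floordiv (hi - 1 - (lo + 1) - 1) 2
          = PySem.Int.floordiv (hi - lo - 1) 2 - 1 := by omega
      have he1 : 1 ≤ PySem.Int.floordiv (hi - lo - 1) 2 := by omega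
      rw [ih (lo + 1) (hi - 1) (by omega) (by omega) _ k]
      have hlen1 : ((PySem.List.pyRange 0 h 1).foldl
          (fun o r => pvSetCell (pvSetCell o r (lo + 1) lC) r (hi - 1) rC) g).length
          = g.length := by
        have hbody : ∀ (o : List (List Int)) (r : Int), r ∈ PySem.List.pyRange 0 h 1 →
            pvSetCell (pvSetCell o r (lo + 1) lC) r (hi - 1) rC
              = PySem.List.pySetD o r
                  (PySem.List.pySetD (PySem.List.pySetD (PySem.List.pyGetD o r []) (lo + 1) lC)
                    (hi - 1) rC) :=
          fun o r hrm =>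
            pvSetCell2 o r (lo + 1) lC (hi - 1) rC ((PySem.List.mem_pyRange_one).mp hrm).1
        rw [PySem.List.foldl_congr_mem _ _ _ g hbody]
        exact foldl_pySetD_length _ _ g
      rw [hlen1, layerH h lC rC lo hi g k]
      by_cases hc : (k : Int) < h ∧ k < g.length
      · rw [if_pos hc, if_pos hc, if_pos hc]
        cases hx : g[k]? with
        | none => rfl
        | some row =>
          simp only [Option.map_some]
          rw [heq, show lo + 1 + 1 = lo + 2 from by ring,
            show lo + 1 + (PySem.Int.floordiv (hi - lo - 1) 2 - 1)
              = lo + PySem.Int.floordiv (hi - lo - 1) 2 from by ring,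
            show hi - 1 - (PySem.Int.floordiv (hi - lo - 1) 2 - 1)
              = hi - PySem.Int.floordiv (hi - lo - 1) 2 from by ring,
            show hi - 1 - 1 = hi - 2 from by ring]
          exact congrArg some (paintStep lC rC lo hi _ h0 he1 (by omega) row)
      · rw [if_neg hc, if_neg hc, if_neg hc]

theorem growH_eq (grid : List (List Int)) (lC rC lo hi : Int) (h0 : 0 ≤ lo) :
    pvGrowH (grid.length : Int) lC rC lo hi (grid.map fun row => row)
      = grid.map (fun row => (PySem.List.enumerate row 0).map (fun p =>
          if lo + 1 ≤ p.1 ∧ p.1 ≤ lo + PySem.Int.floordiv (hi - lo - 1) 2 then lC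
          else if hi - PySem.Int.floordiv (hi - lo - 1) 2 ≤ p.1 ∧ p.1 ≤ hi - 1 then rC
          else p.2)) := by
  rw [List.map_id' grid]
  apply List.ext_getElem?
  intro k
  rw [growH_char (grid.length : Int) lC rC (hi - lo).toNat lo hi le_rfl h0 grid k,
    List.getElem?_map]
  by_cases hk : k < grid.length
  · rw [if_pos ⟨by omega, hk⟩, List.getElem?_eq_getElem hk]
    simp only [Option.map_some]
    rfl
  · rw [if_neg (by omega), List.getElem?_eq_none (by omega)]
    rfl

theorem growV_base (w tC bC lo hi : Int) (hstop : hi - lo ≤ 2) (g : List (List Int)) (k : Nat) :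
    (pvGrowV w tC bC lo hi g)[k]? =
      if lo + 1 ≤ (k : Int) ∧ (k : Int) ≤ lo + PySem.Int.floordiv (hi - lo - 1) 2 ∧ k < g.length
      then some (PySem.List.pyRepeat [tC] w)
      else if hi - PySem.Int.floordiv (hi - lo - 1) 2 ≤ (k : Int) ∧ (k : Int) ≤ hi - 1 ∧
          k < g.length
      then some (PySem.List.pyRepeat [bC] w)
      else g[k]? := by
  rw [pvGrowV, dif_pos hstop]
  have hm := PySem.Int.floordiv_mul_add_mod (hi - lo - 1) 2
  have hm2 := PySem.Int.mod_nonneg (hi - lo - 1) (b := 2) (by norm_num)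
  have hm3 := PySem.Int.mod_lt (hi - lo - 1) (b := 2) (by norm_num)
  rw [if_neg (by omega), if_neg (by omega)]

theorem growV_char (w tC bC : Int) :
    ∀ (fuel : Nat) (lo hi : Int), (hi - lo).toNat ≤ fuel → 0 ≤ lo →
      ∀ (g : List (List Int)) (k : Nat),
        (pvGrowV w tC bC lo hi g)[k]? =
          if lo + 1 ≤ (k : Int) ∧ (k : Int) ≤ lo + PySem.Int.floordiv (hi - lo - 1) 2 ∧
              k < g.length
          then some (PySem.List.pyRepeat [tC] w)
          else if hi - PySem.Int.floordiv (hi - lo - 1) 2 ≤ (k : Int) ∧ (k : Int) ≤ hi - 1 ∧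
              k < g.length
          then some (PySem.List.pyRepeat [bC] w)
          else g[k]? := by
  intro fuel
  induction fuel with
  | zero =>
    intro lo hi hf h0 g k
    exact growV_base w tC bC lo hi (by omega) g k
  | succ n ih =>
    intro lo hi hf h0 g k
    by_cases hstop : hi - lo ≤ 2
    · exact growV_base w tC bC lo hi hstop g k
    · rw [pvGrowV, dif_neg hstop]
      have hm := PySem.Int.floordiv_mul_add_mod (hi - lo - 1) 2
      have hm2 := PySem.Int.mod_nonneg (hi - lo - 1) (b := 2) (by norm_num)
      have hm3 := PySem.Int.mod_lt (hi - lo - 1) (b := 2) (by norm_num)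
      have hm' := PySem.Int.floordiv_mul_add_mod (hi - 1 - (lo + 1) - 1) 2
      have hm2' := PySem.Int.mod_nonneg (hi - 1 - (lo + 1) - 1) (b := 2) (by norm_num)
      have hm3' := PySem.Int.mod_lt (hi - 1 - (lo + 1) - 1) (b := 2) (by norm_num)
      have heq : PySem.Int.floordiv (hi - 1 - (lo + 1) - 1) 2
          = PySem.Int.floordiv (hi - lo - 1) 2 - 1 := by omega
      rw [ih (lo + 1) (hi - 1) (by omega) (by omega) _ k]
      rw [PySem.List.pySetD_of_nonneg g _ (show (0 : Int) ≤ lo + 1 by omega),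
        PySem.List.pySetD_of_nonneg _ _ (show (0 : Int) ≤ hi - 1 by omega)]
      rw [List.getElem?_set, List.getElem?_set]
      simp only [List.length_set, heq]
      split_ifs <;>
        first
          | rfl
          | omega
          | (rw [List.getElem?_eq_none (show g.length ≤ k by omega)])
      
theorem growV_eq (grid : List (List Int)) (w tC bC lo hi : Int) (h0 : 0 ≤ lo) :
    pvGrowV w tC bC lo hi (grid.map fun row => row)
      = (PySem.List.enumerate grid 0).map (fun p =>
          if lo + 1 ≤ p.1 ∧ p.1 ≤ lo + PySem.Int.floordiv (hi - lo - 1) 2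
          then PySem.List.pyRepeat [tC] w
          else if hi - PySem.Int.floordiv (hi - lo - 1) 2 ≤ p.1 ∧ p.1 ≤ hi - 1
          then PySem.List.pyRepeat [bC] w
          else p.2.map (fun x => x)) := by
  rw [List.map_id' grid]
  apply List.ext_getElem?
  intro k
  rw [growV_char w tC bC (hi - lo).toNat lo hi le_rfl h0 grid k, List.getElem?_map,
    PySem.List.getElem?_enumerate]
  by_cases hk : k < grid.length
  · rw [List.getElem?_eq_getElem hk]
    simp only [Option.map_some, zero_add]
    split_ifs <;> first | rfl | omega | (rw [List.map_id'])
  · rw [List.getElem?_eq_none (by omega), if_neg (by omega), if_neg (by omega)]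
    rfl

-- ----- bounding boxes -----

theorem foldl_nested_flatMap {α β σ : Type} (l : List α) (m : α → List β) (g : σ → α → β → σ)
    (init : σ) :
    l.foldl (fun s a => (m a).foldl (fun s b => g s a b) s) init
      = (l.flatMap (fun a => (m a).map (fun b => (a, b)))).foldl (fun s p => g s p.1 p.2) init := by
  induction l generalizing init with
  | nil => rfl
  | cons x xs ih => simp [List.flatMap_cons, List.foldl_append, List.foldl_map, ih]

def pvCells (grid : List (List Int)) (h w col : Int) : List (Int × Int) :=
  ((PySem.List.pyRange 0 h 1).flatMap
      (fun r => (PySem.List.pyRange 0 w 1).map (fun c => (r, c)))).filter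
    (fun rc => PySem.List.pyGetD (PySem.List.pyGetD grid rc.1 []) rc.2 0 == col)

theorem pvBoundsA_char (grid : List (List Int)) (h w col : Int) :
    pvBoundsA grid h w col =
      (((pvCells grid h w col).map (fun rc => rc.1)).foldl min h,
       ((pvCells grid h w col).map (fun rc => rc.1)).foldl max (-1),
       ((pvCells grid h w col).map (fun rc => rc.2)).foldl min w,
       ((pvCells grid h w col).map (fun rc => rc.2)).foldl max (-1)) := by
  unfold pvBoundsA pvCells
  rw [foldl_nested_flatMap (PySem.List.pyRange 0 h 1)
    (fun _ => PySem.List.pyRange 0 w 1)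
    (fun s r c =>
      if PySem.List.pyGetD (PySem.List.pyGetD grid r []) c 0 == col then
        (if r < s.1 then r else s.1,
         if r > s.2.1 then r else s.2.1,
         if c < s.2.2.1 then c else s.2.2.1,
         if c > s.2.2.2 then c else s.2.2.2)
      else s)
    ((h, -1, w, -1) : Int × Int × Int × Int)]
  rw [PySem.List.foldl_if_eq_foldl_filter
    (fun rc : Int × Int => PySem.List.pyGetD (PySem.List.pyGetD grid rc.1 []) rc.2 0 == col)
    (fun s (rc : Int × Int) =>
      ((if rc.1 < s.1 then rc.1 else s.1,
        if rc.1 > s.2.1 then rc.1 else s.2.1,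
        if rc.2 < s.2.2.1 then rc.2 else s.2.2.1,
        if rc.2 > s.2.2.2 then rc.2 else s.2.2.2) : Int × Int × Int × Int))]
  have hupd : (fun (s : Int × Int × Int × Int) (rc : Int × Int) =>
      ((if rc.1 < s.1 then rc.1 else s.1,
        if rc.1 > s.2.1 then rc.1 else s.2.1,
        if rc.2 < s.2.2.1 then rc.2 else s.2.2.1,
        if rc.2 > s.2.2.2 then rc.2 else s.2.2.2) : Int × Int × Int × Int))
      = (fun s rc => (min s.1 rc.1, max s.2.1 rc.1, min s.2.2.1 rc.2, max s.2.2.2 rc.2)) := by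
    funext s rc
    refine Prod.ext ?_ (Prod.ext ?_ (Prod.ext ?_ ?_)) <;> simp [min_def, max_def] <;> omega
  rw [hupd]
  rw [PySem.List.foldl_prod_mk (f := fun a (rc : Int × Int) => min a rc.1)
    (g := fun (b : Int × Int × Int) (rc : Int × Int) =>
      (max b.1 rc.1, min b.2.1 rc.2, max b.2.2 rc.2))]
  rw [PySem.List.foldl_prod_mk (f := fun a (rc : Int × Int) => max a rc.1)
    (g := fun (b : Int × Int) (rc : Int × Int) => (min b.1 rc.2, max b.2 rc.2))]
  rw [PySem.List.foldl_prod_mk (f := fun a (rc : Int × Int) => min a rc.2)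
    (g := fun (b : Int) (rc : Int × Int) => max b rc.2)]
  simp only [List.foldl_map]

theorem cellsMem (grid : List (List Int)) (w col : Int) (rc : Int × Int) :
    rc ∈ pvCells grid (grid.length : Int) w col ↔
      (0 ≤ rc.1 ∧ rc.1 < (grid.length : Int) ∧ 0 ≤ rc.2 ∧ rc.2 < w ∧
        PySem.List.pyGetD (PySem.List.pyGetD grid rc.1 []) rc.2 0 = col) := by
  unfold pvCells
  rw [List.mem_filter]
  simp only [List.mem_flatMap, List.mem_map, PySem.List.mem_pyRange_one, beq_iff_eq]
  constructor
  · rintro ⟨⟨r, ⟨hr0, hrh⟩, c, ⟨hc0, hcw⟩, rfl⟩, hv⟩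
    exact ⟨hr0, hrh, hc0, hcw, hv⟩
  · rintro ⟨hr0, hrh, hc0, hcw, hv⟩
    exact ⟨⟨rc.1, ⟨hr0, hrh⟩, rc.2, ⟨hc0, hcw⟩, rfl⟩, hv⟩

theorem foldl_min_eq (xs ys : List Int) (init m : Int)
    (hm : PySem.List.min? ys (fun x => x) = some m)
    (hmem : ∀ x : Int, x ∈ xs ↔ x ∈ ys)
    (hle : ∀ x ∈ xs, x ≤ init) : xs.foldl min init = m := by
  have hmx : m ∈ xs := (hmem m).mpr (PySem.List.min?_mem hm)
  apply le_antisymm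
  · exact (PySem.List.foldl_min_le xs init).2 m hmx
  · rcases PySem.List.foldl_min_mem xs init with h | h
    · rw [h]; exact hle m hmx
    · exact PySem.List.min?_isMin hm _ ((hmem _).mp h)

theorem foldl_max_eq (xs ys : List Int) (init m : Int)
    (hm : PySem.List.max? ys (fun x => x) = some m)
    (hmem : ∀ x : Int, x ∈ xs ↔ x ∈ ys)
    (hge : ∀ x ∈ xs, init ≤ x) : xs.foldl max init = m := by
  have hmx : m ∈ xs := (hmem m).mpr (PySem.List.max?_mem hm)
  apply le_antisymm
  · rcases PySem.List.foldl_max_mem xs init with h | h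
    · rw [h]; exact hge m hmx
    · exact PySem.List.max?_isMax hm _ ((hmem _).mp h)
  · exact (PySem.List.le_foldl_max xs init).2 m hmx

theorem pyGetD_natGet {α : Type} (l : List α) (k : Nat) (d : α) (hk : k < l.length) :
    PySem.List.pyGetD l ((k : Int)) d = l[k] := by
  rw [PySem.List.pyGetD_natCast]; exact List.getD_eq_getElem l d hk

theorem bounds_eq (grid : List (List Int)) (w col : Int)
    (hrect : ∀ row ∈ grid, (row.length : Int) = w)
    (hcol : col ∈ grid.flatMap (fun row => row)) :
    pvBoundsA grid (grid.length : Int) w col = pvBoxB grid w col ∧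
      0 ≤ (pvBoxB grid w col).1 ∧ 0 ≤ (pvBoxB grid w col).2.1 ∧
      0 ≤ (pvBoxB grid w col).2.2.1 ∧ 0 ≤ (pvBoxB grid w col).2.2.2 := by
  obtain ⟨row0, hrow0m, hcol0⟩ := List.mem_flatMap.mp hcol
  obtain ⟨k0, hk0, hk0v⟩ := List.mem_iff_getElem.mp hrow0m
  obtain ⟨j0, hj0, hj0v⟩ := List.mem_iff_getElem.mp hcol0
  have hwrow0 : (row0.length : Int) = w := hrect row0 hrow0m
  have hcell0 : (((k0 : Int), (j0 : Int)) : Int × Int) ∈ pvCells grid (grid.length : Int) w col := by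
    rw [cellsMem]
    refine ⟨by omega, by omega, by omega, by omega, ?_⟩
    show PySem.List.pyGetD (PySem.List.pyGetD grid ((k0 : Int)) []) ((j0 : Int)) 0 = col
    rw [pyGetD_natGet grid k0 [] hk0, hk0v, pyGetD_natGet row0 j0 0 hj0, hj0v]
  have hmemR : ∀ x : Int,
      (x ∈ (pvCells grid (grid.length : Int) w col).map (fun rc => rc.1) ↔
        x ∈ ((PySem.List.enumerate grid 0).filter (fun p => p.2.contains col)).map
          (fun p => p.1)) := by
    intro x
    simp only [List.mem_map, List.mem_filter]
    constructor
    · rintro ⟨rc, hrc, rfl⟩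
      rw [cellsMem] at hrc
      obtain ⟨h1, h2, h3, h4, h5⟩ := hrc
      have hkn : rc.1.toNat < grid.length := by omega
      have hrowmem : grid[rc.1.toNat] ∈ grid := List.getElem_mem hkn
      have hwr : (grid[rc.1.toNat].length : Int) = w := hrect _ hrowmem
      rw [PySem.List.pyGetD_eq_getElem grid [] h1 (by omega)] at h5
      have hlt : rc.2 < ((grid[rc.1.toNat]).length : Int) := by omega
      rw [PySem.List.pyGetD_eq_getElem grid[rc.1.toNat] 0 h3 hlt] at h5
      refine ⟨(rc.1, grid[rc.1.toNat]), ⟨?_, ?_⟩, rfl⟩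
      · rw [PySem.List.mem_enumerate_iff]
        exact ⟨rc.1.toNat, hkn, by rw [Prod.ext_iff]; exact ⟨by simp; omega, by simp⟩⟩
      · have hjn : rc.2.toNat < grid[rc.1.toNat].length := by omega
        exact List.contains_iff_mem.mpr (h5 ▸ List.getElem_mem hjn)
    · rintro ⟨p, ⟨hpe, hpc⟩, rfl⟩
      obtain ⟨k, hk, rfl⟩ := (PySem.List.mem_enumerate_iff grid 0 p).mp hpe
      have hcm : col ∈ grid[k] := List.contains_iff_mem.mp hpc
      obtain ⟨j, hj, hjv⟩ := List.mem_iff_getElem.mp hcm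
      have hwr : (grid[k].length : Int) = w := hrect _ (List.getElem_mem hk)
      refine ⟨((k : Int), (j : Int)), ?_, by simp⟩
      rw [cellsMem]
      refine ⟨by omega, by omega, by omega, by omega, ?_⟩
      show PySem.List.pyGetD (PySem.List.pyGetD grid ((k : Int)) []) ((j : Int)) 0 = col
      rw [pyGetD_natGet grid k [] hk, pyGetD_natGet grid[k] j 0 hj, hjv]
  have hmemC : ∀ x : Int,
      (x ∈ (pvCells grid (grid.length : Int) w col).map (fun rc => rc.2) ↔
        x ∈ (PySem.List.pyRange 0 w 1).filter
          (fun c => grid.any (fun row => PySem.List.pyGetD row c 0 == col))) := by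
    intro x
    simp only [List.mem_map, List.mem_filter, PySem.List.mem_pyRange_one, List.any_eq_true]
    constructor
    · rintro ⟨rc, hrc, rfl⟩
      rw [cellsMem] at hrc
      obtain ⟨h1, h2, h3, h4, h5⟩ := hrc
      have hkn : rc.1.toNat < grid.length := by omega
      rw [PySem.List.pyGetD_eq_getElem grid [] h1 (by omega)] at h5
      exact ⟨⟨h3, h4⟩, grid[rc.1.toNat], List.getElem_mem hkn, by simpa using h5⟩
    · rintro ⟨⟨hx0, hxw⟩, row, hrowmem, hrowv⟩
      obtain ⟨k, hk, hkeq⟩ := List.mem_iff_getElem.mp hrowmem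
      refine ⟨((k : Int), x), ?_, rfl⟩
      rw [cellsMem]
      refine ⟨by omega, by omega, hx0, hxw, ?_⟩
      show PySem.List.pyGetD (PySem.List.pyGetD grid ((k : Int)) []) x 0 = col
      rw [pyGetD_natGet grid k [] hk, hkeq]
      simpa using hrowv
  have hx0R : ((k0 : Int)) ∈ (pvCells grid (grid.length : Int) w col).map (fun rc => rc.1) :=
    List.mem_map.mpr ⟨_, hcell0, rfl⟩
  have hx0C : ((j0 : Int)) ∈ (pvCells grid (grid.length : Int) w col).map (fun rc => rc.2) :=
    List.mem_map.mpr ⟨_, hcell0, rfl⟩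
  have hrsne : ((PySem.List.enumerate grid 0).filter (fun p => p.2.contains col)).map
      (fun p => p.1) ≠ [] := List.ne_nil_of_mem ((hmemR _).mp hx0R)
  have hcsne : (PySem.List.pyRange 0 w 1).filter
      (fun c => grid.any (fun row => PySem.List.pyGetD row c 0 == col)) ≠ [] :=
    List.ne_nil_of_mem ((hmemC _).mp hx0C)
  obtain ⟨mr, hmr⟩ : ∃ m, PySem.List.min? (((PySem.List.enumerate grid 0).filter
      (fun p => p.2.contains col)).map (fun p => p.1)) (fun x => x) = some m := by
    cases h : PySem.List.min? _ (fun x : Int => x) with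
    | some m => exact ⟨m, rfl⟩
    | none => exact absurd ((PySem.List.min?_eq_none_iff _ _).mp h) hrsne
  obtain ⟨Mr, hMr⟩ : ∃ m, PySem.List.max? (((PySem.List.enumerate grid 0).filter
      (fun p => p.2.contains col)).map (fun p => p.1)) (fun x => x) = some m := by
    cases h : PySem.List.max? _ (fun x : Int => x) with
    | some m => exact ⟨m, rfl⟩
    | none => exact absurd ((PySem.List.max?_eq_none_iff _ _).mp h) hrsne
  obtain ⟨mc, hmc⟩ : ∃ m, PySem.List.min? ((PySem.List.pyRange 0 w 1).filter
      (fun c => grid.any (fun row => PySem.List.pyGetD row c 0 == col))) (fun x => x) = some m := by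
    cases h : PySem.List.min? _ (fun x : Int => x) with
    | some m => exact ⟨m, rfl⟩
    | none => exact absurd ((PySem.List.min?_eq_none_iff _ _).mp h) hcsne
  obtain ⟨Mc, hMc⟩ : ∃ m, PySem.List.max? ((PySem.List.pyRange 0 w 1).filter
      (fun c => grid.any (fun row => PySem.List.pyGetD row c 0 == col))) (fun x => x) = some m := by
    cases h : PySem.List.max? _ (fun x : Int => x) with
    | some m => exact ⟨m, rfl⟩
    | none => exact absurd ((PySem.List.max?_eq_none_iff _ _).mp h) hcsne
  have hboundR : ∀ x ∈ (pvCells grid (grid.length : Int) w col).map (fun rc => rc.1),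
      0 ≤ x ∧ x ≤ (grid.length : Int) := by
    intro x hx
    obtain ⟨rc, hrc, rfl⟩ := List.mem_map.mp hx
    rw [cellsMem] at hrc
    exact ⟨hrc.1, by have := hrc.2.1; omega⟩
  have hboundC : ∀ x ∈ (pvCells grid (grid.length : Int) w col).map (fun rc => rc.2),
      0 ≤ x ∧ x ≤ w := by
    intro x hx
    obtain ⟨rc, hrc, rfl⟩ := List.mem_map.mp hx
    rw [cellsMem] at hrc
    exact ⟨hrc.2.2.1, by have := hrc.2.2.2.1; omega⟩
  have hbox : pvBoxB grid w col = (mr, Mr, mc, Mc) := by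
    unfold pvBoxB pvMinB pvMaxB
    simp only [hmr, hMr, hmc, hMc]
  rw [pvBoundsA_char, hbox]
  refine ⟨Prod.ext ?_ (Prod.ext ?_ (Prod.ext ?_ ?_)), ?_, ?_, ?_, ?_⟩
  · exact foldl_min_eq _ _ _ _ hmr hmemR (fun x hx => (hboundR x hx).2)
  · exact foldl_max_eq _ _ _ _ hMr hmemR (fun x hx => by have := (hboundR x hx).1; omega)
  · exact foldl_min_eq _ _ _ _ hmc hmemC (fun x hx => (hboundC x hx).2)
  · exact foldl_max_eq _ _ _ _ hMc hmemC (fun x hx => by have := (hboundC x hx).1; omega)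
  · exact (hboundR _ ((hmemR mr).mpr (PySem.List.min?_mem hmr))).1
  · exact (hboundR _ ((hmemR Mr).mpr (PySem.List.max?_mem hMr))).1
  · exact (hboundC _ ((hmemC mc).mpr (PySem.List.min?_mem hmc))).1
  · exact (hboundC _ ((hmemC Mc).mpr (PySem.List.max?_mem hMc))).1

theorem cnt_eq (grid : List (List Int)) :
    grid.foldl (fun d row => row.foldl (fun d x => PySem.Dict.modify d x 0 (· + 1)) d)
        PySem.Dict.empty
      = PySem.Dict.counter (grid.flatMap (fun row => row)) := by
  rw [PySem.Dict.counter_eq_foldl, List.flatMap_id', ← List.foldl_flatten]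

theorem pvDisj (L R k : Int) :
    ¬((L + 1 ≤ k ∧ k ≤ L + PySem.Int.floordiv (R - L - 1) 2) ∧
      (R - PySem.Int.floordiv (R - L - 1) 2 ≤ k ∧ k ≤ R - 1)) := by
  have h1 := PySem.Int.floordiv_mul_add_mod (R - L - 1) 2
  have h2 := PySem.Int.mod_nonneg (R - L - 1) (b := 2) (by norm_num)
  have h3 := PySem.Int.mod_lt (R - L - 1) (b := 2) (by norm_num)
  omega

theorem pvStart_nonneg (L R : Int) (hL : 0 ≤ L) (hR : 0 ≤ R) :
    0 ≤ R - PySem.Int.floordiv (R - L - 1) 2 := by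
  have h1 := PySem.Int.floordiv_mul_add_mod (R - L - 1) 2
  have h2 := PySem.Int.mod_nonneg (R - L - 1) (b := 2) (by norm_num)
  have h3 := PySem.Int.mod_lt (R - L - 1) (b := 2) (by norm_num)
  omega

theorem pvBranch_eq (grid : List (List Int)) (colours : List Int)
    (hrect : ∀ row ∈ grid,
      (row.length : Int) = (((PySem.List.pyGetD grid 0 []).length : Nat) : Int))
    (hmemc : ∀ i : Nat, i < 2 → PySem.List.pyGetD colours (i : Int) 0 ∈
      grid.flatMap (fun row => row)) :
    (let h : Int := grid.length
     let w : Int := (PySem.List.pyGetD grid 0 []).length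
     let cA := PySem.List.pyGetD colours 0 0
     let cB := PySem.List.pyGetD colours 1 0
     let ba := pvBoundsA grid h w cA
     let bb := pvBoundsA grid h w cB
     let rowsOverlap := !(decide (ba.2.1 < bb.1) || decide (bb.2.1 < ba.1))
     let out := grid.map (fun row => row)
     if rowsOverlap then
       let lr := if ba.2.2.1 < bb.2.2.1 then (cA, ba.2.2.1, ba.2.2.2, cB, bb.2.2.1, bb.2.2.2)
                 else (cB, bb.2.2.1, bb.2.2.2, cA, ba.2.2.1, ba.2.2.2)
       let leftCol := lr.1; let leftMaxC := lr.2.2.1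
       let rightCol := lr.2.2.2.1; let rightMinC := lr.2.2.2.2.1
       let gap := rightMinC - leftMaxC - 1
       let expand := PySem.Int.floordiv gap 2
       let leftStart := leftMaxC + 1
       let leftEnd := leftMaxC + expand
       let rightStart := rightMinC - expand
       let rightEnd := rightMinC - 1
       (PySem.List.pyRange 0 h 1).foldl (fun out r =>
         (PySem.List.pyRange rightStart (rightEnd + 1) 1).foldl
           (fun out c => pvSetCell out r c rightCol)
           ((PySem.List.pyRange leftStart (leftEnd + 1) 1).foldl
             (fun out c => pvSetCell out r c leftCol) out)) out
     else
       let tb := if ba.1 < bb.1 then (cA, ba.1, ba.2.1, cB, bb.1, bb.2.1)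
                 else (cB, bb.1, bb.2.1, cA, ba.1, ba.2.1)
       let topCol := tb.1; let topMaxR := tb.2.2.1
       let botCol := tb.2.2.2.1; let botMinR := tb.2.2.2.2.1
       let gap := botMinR - topMaxR - 1
       let expand := PySem.Int.floordiv gap 2
       let topStart := topMaxR + 1
       let topEnd := topMaxR + expand
       let botStart := botMinR - expand
       let botEnd := botMinR - 1
       (PySem.List.pyRange botStart (botEnd + 1) 1).foldl (fun out r =>
         (PySem.List.pyRange 0 w 1).foldl (fun out c => pvSetCell out r c botCol) out)
         ((PySem.List.pyRange topStart (topEnd + 1) 1).foldl (fun out r =>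
           (PySem.List.pyRange 0 w 1).foldl (fun out c => pvSetCell out r c topCol) out) out))
    = (let h : Int := grid.length
       let w : Int := (PySem.List.pyGetD grid 0 []).length
       let cA := PySem.List.pyGetD colours 0 0
       let cB := PySem.List.pyGetD colours 1 0
       let ba := pvBoxB grid w cA
       let bb := pvBoxB grid w cB
       let out := grid.map (fun row => row)
       let rowsOverlap := !(decide (ba.2.1 < bb.1) || decide (bb.2.1 < ba.1))
       if rowsOverlap then
         let lr := if ba.2.2.1 < bb.2.2.1 then (cA, ba.2.2.2, cB, bb.2.2.1)
                   else (cB, bb.2.2.2, cA, ba.2.2.1)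
         pvGrowH h lr.1 lr.2.2.1 lr.2.1 lr.2.2.2 out
       else
         let tb := if ba.1 < bb.1 then (cA, ba.2.1, cB, bb.1)
                   else (cB, bb.2.1, cA, ba.1)
         pvGrowV w tb.1 tb.2.2.1 tb.2.1 tb.2.2.2 out) := by
  have hbA := bounds_eq grid _ (PySem.List.pyGetD colours 0 0) hrect
    (by exact_mod_cast hmemc 0 (by omega))
  have hbB := bounds_eq grid _ (PySem.List.pyGetD colours 1 0) hrect
    (by exact_mod_cast hmemc 1 (by omega))
  simp only [hbA.1, hbB.1]
  by_cases hov : ((!(decide ((pvBoxB grid (((PySem.List.pyGetD grid 0 []).length : Nat) : Int)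
        (PySem.List.pyGetD colours 0 0)).2.1 <
      (pvBoxB grid (((PySem.List.pyGetD grid 0 []).length : Nat) : Int)
        (PySem.List.pyGetD colours 1 0)).1) ||
      decide ((pvBoxB grid (((PySem.List.pyGetD grid 0 []).length : Nat) : Int)
        (PySem.List.pyGetD colours 1 0)).2.1 <
      (pvBoxB grid (((PySem.List.pyGetD grid 0 []).length : Nat) : Int)
        (PySem.List.pyGetD colours 0 0)).1))) = true)
  · rw [if_pos hov, if_pos hov]
    by_cases hlr : (pvBoxB grid (((PySem.List.pyGetD grid 0 []).length : Nat) : Int)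
          (PySem.List.pyGetD colours 0 0)).2.2.1 <
        (pvBoxB grid (((PySem.List.pyGetD grid 0 []).length : Nat) : Int)
          (PySem.List.pyGetD colours 1 0)).2.2.1
    · rw [if_pos hlr, if_pos hlr]
      dsimp only
      rw [growH_eq grid _ _ _ _ (by have := hbA.2.2.2.2; omega)]
      refine fillH_eq grid _ _ _ _ _ _ ?_ ?_ ?_
      · have := hbA.2.2.2.2; omega
      · exact pvStart_nonneg _ _ (by have := hbA.2.2.2.2; omega)
          (by have := hbB.2.2.2.1; omega)
      · exact fun k => pvDisj _ _ k
    · rw [if_neg hlr, if_neg hlr]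
      dsimp only
      rw [growH_eq grid _ _ _ _ (by have := hbB.2.2.2.2; omega)]
      refine fillH_eq grid _ _ _ _ _ _ ?_ ?_ ?_
      · have := hbB.2.2.2.2; omega
      · exact pvStart_nonneg _ _ (by have := hbB.2.2.2.2; omega)
          (by have := hbA.2.2.2.1; omega)
      · exact fun k => pvDisj _ _ k
  · rw [if_neg hov, if_neg hov]
    by_cases htb : (pvBoxB grid (((PySem.List.pyGetD grid 0 []).length : Nat) : Int)
          (PySem.List.pyGetD colours 0 0)).1 <
        (pvBoxB grid (((PySem.List.pyGetD grid 0 []).length : Nat) : Int)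
          (PySem.List.pyGetD colours 1 0)).1
    · rw [if_pos htb, if_pos htb]
      dsimp only
      rw [growV_eq grid _ _ _ _ _ (by have := hbA.2.2.1; omega)]
      refine fillV_eq grid _ _ _ _ _ _ _ ?_ ?_ ?_ hrect
      · have := hbA.2.2.1; omega
      · exact pvStart_nonneg _ _ (by have := hbA.2.2.1; omega) (by have := hbB.2.1; omega)
      · exact fun k => pvDisj _ _ k
    · rw [if_neg htb, if_neg htb]
      dsimp only
      rw [growV_eq grid _ _ _ _ _ (by have := hbB.2.2.1; omega)]
      refine fillV_eq grid _ _ _ _ _ _ _ ?_ ?_ ?_ hrect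
      · have := hbB.2.2.1; omega
      · exact pvStart_nonneg _ _ (by have := hbB.2.2.1; omega) (by have := hbA.2.1; omega)
      · exact fun k => pvDisj _ _ k

-- ===== VERDICT (by name: the statement is the Claim_ definition above) =====
theorem transform_spec : Claim_equal_transform := by
  intro grid _ hpre
  obtain ⟨hflat, hdor⟩ := hpre
  unfold Spec_transform
  have hne : grid ≠ [] := by
    intro h
    exact hflat (by rw [h]; rfl)
  have hw0 : PySem.List.pyGetD grid 0 [] = grid.headD [] := by
    cases grid with
    | nil => exact absurd rfl hne
    | cons a l => rw [PySem.List.pyGetD_zero]; rfl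
  show transform grid = transform_alt grid
  unfold transform transform_alt
  simp only [pvMostCommon1]
  rw [cnt_eq]
  by_cases hc : (((PySem.Dict.counter (grid.flatMap (fun row => row))).keys.filter
      (fun c => !(c == match PySem.List.max?
          (PySem.Dict.counter (grid.flatMap (fun row => row))).items (fun kv => kv.2) with
        | some kv => kv.1
        | none => 0))).length ≠ 2)
  · rw [if_pos hc, if_pos hc]
  · rw [if_neg hc, if_neg hc]
    have hlen2 : (((PySem.Dict.counter (grid.flatMap (fun row => row))).keys.filter
        (fun c => !(c == match PySem.List.max?
            (PySem.Dict.counter (grid.flatMap (fun row => row))).items (fun kv => kv.2) with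
          | some kv => kv.1
          | none => 0))).length = 2) := by omega
    obtain ⟨kv, hkv⟩ : ∃ kv, PySem.List.max?
        (PySem.Dict.counter (grid.flatMap (fun row => row))).items (fun kv => kv.2) = some kv := by
      cases h : PySem.List.max?
          (PySem.Dict.counter (grid.flatMap (fun row => row))).items (fun kv => kv.2) with
      | some kv => exact ⟨kv, rfl⟩
      | none =>
        exfalso
        have hitems := (PySem.List.max?_eq_none_iff _ _).mp h
        rw [PySem.Dict.items_counter] at hitems
        obtain ⟨x, hx⟩ := List.exists_mem_of_ne_nil _ hflat
        have hxo : x ∈ PySem.Set.ofList (grid.flatMap (fun row => row)) :=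
          (PySem.Set.mem_ofList _ _).mpr hx
        rw [List.map_eq_nil_iff] at hitems
        rw [hitems] at hxo
        exact absurd hxo (List.not_mem_nil)
    have hbg : (match PySem.List.max?
        (PySem.Dict.counter (grid.flatMap (fun row => row))).items (fun kv => kv.2) with
      | some kv => kv.1
      | none => 0) = kv.1 := by rw [hkv]
    have hnodup : ((PySem.Dict.counter (grid.flatMap (fun row => row))).keys).Nodup :=
      PySem.Dict.nodup_keys_counter _
    have hkv1mem : kv.1 ∈ (PySem.Dict.counter (grid.flatMap (fun row => row))).keys := by
      have hkvmem := PySem.List.max?_mem hkv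
      simp only [PySem.Dict.keys]
      exact List.mem_map.mpr ⟨kv, hkvmem, rfl⟩
    have hkeylen := hlen2
    simp only [hbg] at hkeylen
    have hfe : ((PySem.Dict.counter (grid.flatMap (fun row => row))).keys.filter
        (fun c => !(c == kv.1))) = ((PySem.Dict.counter (grid.flatMap (fun row => row))).keys.erase
          kv.1) := by
      rw [List.Nodup.erase_eq_filter hnodup]
      exact List.filter_congr (fun c _ => by simp [bne])
    rw [hfe, List.length_erase_of_mem hkv1mem] at hkeylen
    have hkeysne : (PySem.Dict.counter (grid.flatMap (fun row => row))).keys.length ≠ 0 := by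
      intro h0
      rw [List.length_eq_zero_iff] at h0
      rw [h0] at hkv1mem
      exact absurd hkv1mem (List.not_mem_nil)
    have hD3 : (PySem.Set.ofList (grid.flatMap (fun row => row))).length = 3 := by
      rw [← PySem.Dict.keys_counter]
      omega
    have hrectN : ∀ row ∈ grid, row.length = (grid.headD []).length := by
      rcases hdor with h | h
      · exact absurd hD3 h
      · exact h
    have hrect : ∀ row ∈ grid,
        (row.length : Int) = (((PySem.List.pyGetD grid 0 []).length : Nat) : Int) := by
      intro row hr
      rw [hw0]
      exact_mod_cast congrArg Nat.cast (hrectN row hr)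
    apply pvBranch_eq grid _ hrect
    intro i hi
    have hic : PySem.List.pyGetD (((PySem.Dict.counter (grid.flatMap (fun row => row))).keys.filter
        (fun c => !(c == match PySem.List.max?
            (PySem.Dict.counter (grid.flatMap (fun row => row))).items (fun kv => kv.2) with
          | some kv => kv.1
          | none => 0))) : List Int) (i : Int) 0 ∈
        ((PySem.Dict.counter (grid.flatMap (fun row => row))).keys.filter
        (fun c => !(c == match PySem.List.max?
            (PySem.Dict.counter (grid.flatMap (fun row => row))).items (fun kv => kv.2) with
          | some kv => kv.1
          | none => 0))) := by
      rw [pyGetD_natGet _ i 0 (by omega)]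
      exact List.getElem_mem (by omega)
    have hstep : ∀ x : Int, x ∈ (PySem.Dict.counter (grid.flatMap (fun row => row))).keys →
        x ∈ grid.flatMap (fun row => row) := by
      intro x hx
      rw [PySem.Dict.keys_counter] at hx
      exact (PySem.Set.mem_ofList _ _).mp hx
    exact hstep _ (List.mem_filter.mp hic).1
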